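-- pv_equiv track=rewrite | github.com/JoshuaOliphant/ResumeAIAssistant | app/services/smart_request_handler.py | _should_use_smart_handling
-- ===== SOURCE A (Python) =====
-- def _should_use_smart_handling(endpoint: str) -> bool:
--     """
--     Determine if an endpoint should use smart request handling
--
--     Args:
--         endpoint: API endpoint path
--
--     Returns:
--         True if endpoint should use smart handling
--     """
--     # Skip for static files, health checks, etc.
--     if endpoint.startswith(("/static/", "/health", "/metrics", "/docs")):
--         return False
--
--     # Apply smart handling for specific API endpoints
--     smart_endpoints = [
--         "/api/v1/ats/analyze",
--         "/api/v1/ats/analyze-and-plan",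
--         "/api/v1/customize/plan",
--         "/api/v1/customize/parallel",
--         "/api/v1/cover-letter"
--     ]
--
--     # Check exact matches
--     if endpoint in smart_endpoints:
--         return True
--
--     # Check prefixes
--     for smart_endpoint in smart_endpoints:
--         if endpoint.startswith(smart_endpoint):
--             return True
--
--     # Default to true for other API endpoints
--     if endpoint.startswith("/api/v1/"):
--         return True
--
--     return False
-- ===== SOURCE B (Python) =====
-- def _should_use_smart_handling(endpoint: str) -> bool:
--     """Same decision, written as one boolean expression: every smart endpoint
--     lives under /api/v1/, so the exact-match list and the prefix loop are
--     redundant with the /api/v1/ fallback."""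
--     if endpoint.startswith(("/static/", "/health", "/metrics", "/docs")):
--         return False
--     return endpoint.startswith("/api/v1/")
-- ===== Notes on version B (the rewrite author's own statement) =====
-- stated objective: simpler
-- what changed: Dropped the smart_endpoints list, the exact-match membership test and the prefix loop entirely (all five entries lie under /api/v1/, so they are subsumed by the fallback); B is the excluded-prefix check followed by a single startswith('/api/v1/').
import Mathlib
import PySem

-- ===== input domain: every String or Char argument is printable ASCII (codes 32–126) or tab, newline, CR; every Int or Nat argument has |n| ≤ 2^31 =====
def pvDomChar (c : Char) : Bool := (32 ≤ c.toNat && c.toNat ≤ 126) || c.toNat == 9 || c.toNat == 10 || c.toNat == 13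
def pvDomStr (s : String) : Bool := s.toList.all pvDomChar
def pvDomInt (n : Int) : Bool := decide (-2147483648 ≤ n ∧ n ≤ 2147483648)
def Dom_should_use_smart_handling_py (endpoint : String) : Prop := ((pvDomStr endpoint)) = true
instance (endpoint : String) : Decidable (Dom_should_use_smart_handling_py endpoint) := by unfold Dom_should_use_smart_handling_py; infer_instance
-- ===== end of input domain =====

-- B drops the smart_endpoints list, membership test and prefix loop (all entries lie under /api/v1/), keeping the excluded-prefix check and one startswith; simpler, same result.
-- ===== PORT A =====
def pvSmartEndpoints : List String :=
  ["/api/v1/ats/analyze",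
   "/api/v1/ats/analyze-and-plan",
   "/api/v1/customize/plan",
   "/api/v1/customize/parallel",
   "/api/v1/cover-letter"]

def should_use_smart_handling_py (endpoint : String) : Bool :=
  if PySem.Str.startswith endpoint "/static/" || PySem.Str.startswith endpoint "/health" ||
     PySem.Str.startswith endpoint "/metrics" || PySem.Str.startswith endpoint "/docs" then
    false
  else if pvSmartEndpoints.contains endpoint then
    true
  else if pvSmartEndpoints.any (fun se => PySem.Str.startswith endpoint se) then
    true
  else if PySem.Str.startswith endpoint "/api/v1/" then
    true
  else
    false

-- ===== PORT B =====
def should_use_smart_handling_py_alt (endpoint : String) : Bool :=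
  if PySem.Str.startswith endpoint "/static/" || PySem.Str.startswith endpoint "/health" ||
     PySem.Str.startswith endpoint "/metrics" || PySem.Str.startswith endpoint "/docs" then
    false
  else
    PySem.Str.startswith endpoint "/api/v1/"

-- ===== PRECONDITION & SPEC =====
def Spec_should_use_smart_handling_py (endpoint : String) (out : Bool) : Prop := out = should_use_smart_handling_py_alt endpoint
instance (endpoint : String) (out : Bool) : Decidable (Spec_should_use_smart_handling_py endpoint out) := by unfold Spec_should_use_smart_handling_py; infer_instance

-- ===== CLAIM (what is proved, stated in full; the proofs are below) =====
def Claim_equal_should_use_smart_handling_py : Prop := ∀ (endpoint : String), Dom_should_use_smart_handling_py endpoint → Spec_should_use_smart_handling_py endpoint (should_use_smart_handling_py endpoint)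

-- ===== LEMMAS AND PROOFS =====

-- ===== VERDICT (by name: the statement is the Claim_ definition above) =====
-- Every smart endpoint (as a member or as a prefix) forces the /api/v1/ prefix.
lemma pv_smart_prefix (endpoint se : String) (hm : se ∈ pvSmartEndpoints)
    (hp : PySem.Str.startswith endpoint se = true) :
    PySem.Str.startswith endpoint "/api/v1/" = true := by
  simp only [PySem.Str.startswith_eq, PySem.Chars.startswith_iff] at hp ⊢
  refine List.IsPrefix.trans ?_ hp
  fin_cases hm <;> decide

lemma pv_startswith_self (s : String) : PySem.Str.startswith s s = true := by
  simp [PySem.Str.startswith_eq, PySem.Chars.startswith_iff]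

theorem should_use_smart_handling_py_spec : Claim_equal_should_use_smart_handling_py := by
  intro endpoint _
  unfold Spec_should_use_smart_handling_py should_use_smart_handling_py should_use_smart_handling_py_alt
  split
  · rfl
  split
  · rename_i hmem
    rw [List.contains_iff_mem] at hmem
    exact (pv_smart_prefix endpoint endpoint hmem (pv_startswith_self endpoint)).symm
  split
  · rename_i hany
    obtain ⟨se, hm, hp⟩ := List.any_eq_true.mp hany
    exact (pv_smart_prefix endpoint se hm hp).symm
  split
  · rename_i h; exact h.symm
  · rename_i h; simpa using h
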